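-- pv_equiv track=rewrite | github.com/algozenith-iiitsonepat/coding-quest | January2024/02nd January/2610-A.py | findMatrix
-- ===== SOURCE A (Python) =====
-- def findMatrix(nums):
--     freq_arr = {}
--     for i in nums:
--         if i in freq_arr:
--             freq_arr[i] += 1
--         else:
--             freq_arr[i] = 1
--     max_freq = max(freq_arr.values())
--     arr = [[] for i in range(max_freq)]
--     for i,j in freq_arr.items():
--         for k in range(j):
--             arr[k].append(i)
--     return arr
-- ===== SOURCE B (Python) =====
-- def findMatrix(nums):
--     freq = {}
--     for x in nums:
--         freq[x] = freq.get(x, 0) + 1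
--     max_freq = max(freq.values())
--     return [[e for e in freq if freq[e] > k] for k in range(max_freq)]
-- ===== Notes on version B (the rewrite author's own statement) =====
-- stated objective: alternative
-- what changed: B builds each row by filtering the distinct-key frequency table once per frequency level (a level-by-level transpose) instead of scattering every element into rows 0..count-1 via indexed appends.
-- outside the precondition, e.g. on findMatrix([]): A raises ValueError, B raises ValueError
import Mathlib
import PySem

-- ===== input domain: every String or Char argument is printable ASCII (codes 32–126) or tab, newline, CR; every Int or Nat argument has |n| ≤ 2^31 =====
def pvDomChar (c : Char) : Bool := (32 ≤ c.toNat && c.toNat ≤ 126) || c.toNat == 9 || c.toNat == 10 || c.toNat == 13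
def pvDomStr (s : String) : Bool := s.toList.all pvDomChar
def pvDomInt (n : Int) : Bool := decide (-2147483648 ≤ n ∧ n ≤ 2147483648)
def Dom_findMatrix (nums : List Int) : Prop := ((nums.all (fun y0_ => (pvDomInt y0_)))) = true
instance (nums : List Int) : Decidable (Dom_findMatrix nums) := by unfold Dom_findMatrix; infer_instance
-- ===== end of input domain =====

-- B replaces A's per-element scatter into rows 0..count-1 by building each row as a
-- filter of the frequency table at one level; same rows, same first-appearance order.

-- ===== PORT A =====
-- arr[k].append(x); k comes from range(j) so 0 ≤ k and .toNat is exact there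
def pvAppendAt (arr : List (List Int)) (k : Int) (x : Int) : List (List Int) :=
  arr.modify k.toNat (fun row => row ++ [x])

def findMatrix (nums : List Int) : List (List Int) :=
  let freq := nums.foldl
    (fun d i => if d.contains i then d.insert i (d.getD i 0 + 1) else d.insert i 1)
    (PySem.Dict.empty : PySem.Dict Int Int)
  match PySem.List.max? freq.values (fun y => y) with
  | none => []   -- max() of an empty dict's values: Python raises ValueError (outside Pre_)
  | some maxFreq =>
    freq.items.foldl
      (fun arr p => (PySem.List.pyRange 0 p.2 1).foldl (fun a k => pvAppendAt a k p.1) arr)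
      ((PySem.List.pyRange 0 maxFreq 1).map (fun _ => ([] : List Int)))

-- ===== PORT B =====
def findMatrix_alt (nums : List Int) : List (List Int) :=
  let freq := nums.foldl (fun d x => d.insert x (d.getD x 0 + 1)) (PySem.Dict.empty : PySem.Dict Int Int)
  match PySem.List.max? freq.values (fun y => y) with
  | none => []   -- max() of an empty dict's values: Python raises ValueError (outside Pre_)
  | some maxFreq =>
    (PySem.List.pyRange 0 maxFreq 1).map (fun k =>
      freq.keys.filter (fun e => decide (freq.getD e 0 > k)))

-- ===== PRECONDITION & SPEC =====
-- Pre_ excludes only nums = [], where the Python A (and B) raises ValueError in max().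
def Pre_findMatrix (nums : List Int) : Prop := nums ≠ []
instance (nums : List Int) : Decidable (Pre_findMatrix nums) := by unfold Pre_findMatrix; infer_instance
def pvWitness_findMatrix : List Int := [1, 2, 1]

def Spec_findMatrix (nums : List Int) (out : List (List Int)) : Prop := out = findMatrix_alt nums
instance (nums : List Int) (out : List (List Int)) : Decidable (Spec_findMatrix nums out) := by unfold Spec_findMatrix; infer_instance

-- ===== CLAIM (what is proved, stated in full; the proofs are below) =====
def Claim_equal_findMatrix : Prop := ∀ (nums : List Int), Dom_findMatrix nums → Pre_findMatrix nums → Spec_findMatrix nums (findMatrix nums)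

-- ===== LEMMAS AND PROOFS =====

-- A's if/else counting step equals B's get-with-default step.
theorem pvStep_eq (d : PySem.Dict Int Int) (i : Int) :
    (if d.contains i then d.insert i (d.getD i 0 + 1) else d.insert i 1)
      = d.insert i (d.getD i 0 + 1) := by
  by_cases h : d.contains i = true
  · simp [h]
  · have h' : d.contains i = false := by simpa using h
    simp [h', PySem.Dict.getD_of_not_contains]

theorem pvDict_eq (nums : List Int) :
    nums.foldl
      (fun d i => if d.contains i then d.insert i (d.getD i 0 + 1) else d.insert i 1)
      (PySem.Dict.empty : PySem.Dict Int Int)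
    = nums.foldl (fun d x => d.insert x (d.getD x 0 + 1)) (PySem.Dict.empty : PySem.Dict Int Int) := by
  simp only [pvStep_eq]

-- the inner range loop of modifies, Nat form
theorem pvFoldModify_getElem? (f : List Int → List Int) (n : Nat) :
    ∀ (arr : List (List Int)) (t : Nat),
      ((List.range n).foldl (fun a k => a.modify k f) arr)[t]? =
        if t < n then arr[t]?.map f else arr[t]? := by
  induction n with
  | zero => intro arr t; simp
  | succ n ih =>
    intro arr t
    rw [List.range_succ, List.foldl_append, List.foldl_cons, List.foldl_nil,
      List.getElem?_modify, ih arr t]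
    by_cases h : t < n
    · have hne : n ≠ t := by omega
      have h1 : t < n + 1 := by omega
      cases arr[t]? <;> simp [h, h1, hne]
    · by_cases h2 : t = n
      · subst h2
        cases arr[t]? <;> simp
      · have h3 : ¬ t < n + 1 := by omega
        have hne : n ≠ t := by omega
        cases arr[t]? <;> simp [h, h3, hne]

-- scatterOne: the pyRange j loop appends x to each of rows 0..j-1
theorem pvScatterOne_getElem? (x : Int) (j : Int) (arr : List (List Int)) (t : Nat) :
    ((PySem.List.pyRange 0 j 1).foldl (fun a k => pvAppendAt a k x) arr)[t]? =
      if (t : Int) < j then arr[t]?.map (fun row => row ++ [x]) else arr[t]? := by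
  rw [PySem.List.pyRange_one, List.foldl_map]
  have hstep : ∀ (a : List (List Int)) (k : Nat),
      pvAppendAt a ((0 : Int) + (k : Int)) x = a.modify k (fun row => row ++ [x]) := by
    intro a k; simp [pvAppendAt]
  simp only [hstep]
  rw [pvFoldModify_getElem?]
  by_cases hj : (t : Int) < j
  · have h1 : t < (j - 0).toNat := by omega
    rw [if_pos h1, if_pos hj]
  · have h1 : ¬ t < (j - 0).toNat := by omega
    rw [if_neg h1, if_neg hj]

-- the outer items loop
theorem pvScatter_getElem? (l : List (Int × Int)) :
    ∀ (arr : List (List Int)) (t : Nat),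
      (l.foldl
        (fun arr p => (PySem.List.pyRange 0 p.2 1).foldl (fun a k => pvAppendAt a k p.1) arr)
        arr)[t]? =
      arr[t]?.map
        (fun row => row ++ (l.filter (fun p => decide ((t : Int) < p.2))).map Prod.fst) := by
  induction l with
  | nil => intro arr t; simp
  | cons p l ih =>
    intro arr t
    rw [List.foldl_cons, ih, pvScatterOne_getElem?]
    by_cases h : (t : Int) < p.2
    · cases arr[t]? <;> simp [h, List.append_assoc]
    · cases arr[t]? <;> simp [h]

-- ===== VERDICT (by name: the statement is the Claim_ definition above) =====
theorem findMatrix_spec : Claim_equal_findMatrix := by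
  intro nums _ _
  unfold Spec_findMatrix
  show findMatrix nums = findMatrix_alt nums
  simp only [findMatrix, findMatrix_alt, pvDict_eq]
  set D := nums.foldl (fun d x => d.insert x (d.getD x 0 + 1)) (PySem.Dict.empty : PySem.Dict Int Int) with hD
  cases hm : PySem.List.max? D.values (fun y => y) with
  | none => rfl
  | some m =>
    have hnd : D.keys.Nodup := by
      rw [hD, PySem.Dict.foldl_insert_getD_add_one_eq_counter]
      exact PySem.Dict.nodup_keys_counter nums
    apply List.ext_getElem?
    intro t
    rw [pvScatter_getElem?, List.getElem?_map, List.getElem?_map]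
    cases hr : (PySem.List.pyRange 0 m 1)[t]? with
    | none => simp
    | some v =>
      have hv : v = (t : Int) := by
        rw [PySem.List.getElem?_pyRange_one] at hr
        split at hr
        · injection hr with h; omega
        · simp at hr
      simp only [Option.map_some]
      congr 1
      rw [PySem.Dict.items_eq_map_keys D hnd 0, List.filter_map, List.map_map]
      simp only [Function.comp_def]
      simp [hv]
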